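-- pv_equiv track=rewrite | github.com/1r0nw1ll/quantum-arithmetic-research | qa_alphageometry_ptolemy/qa_norm_flip_signed_cert_v1/qa_norm_flip_signed_cert_validate.py | compute_t2_preservation
-- ===== SOURCE A (Python) =====
-- def qa_mod(x, m):
--     return ((int(x) - 1) % m) + 1
--
-- def qa_step(b, e, m):
--     return (e, qa_mod(b + e, m))
--
-- def eisenstein_norm(b, e):
--     """f(b, e) = b*b + b*e - e*e. S1: b*b not b**2."""
--     return b * b + b * e - e * e
--
-- def compute_t2_preservation(m):
--     checked = 0
--     matched = 0
--     for b in range(1, m + 1):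
--         for e in range(1, m + 1):
--             checked += 1
--             n0 = eisenstein_norm(b, e) % m
--             b2, e2 = qa_step(b, e, m)
--             b4, e4 = qa_step(b2, e2, m)
--             n2 = eisenstein_norm(b4, e4) % m
--             if n0 == n2:
--                 matched += 1
--     return (checked, matched)
-- ===== SOURCE B (Python) =====
-- def compute_t2_preservation(m):
--     # Two qa_steps send (b, e) to (b', e') with b' = b+e and e' = b+2e mod m,
--     # and the Eisenstein norm satisfies f(b+e, b+2e) = f(b, e) exactly, so the
--     # norm residue is preserved for every pair: matched == checked == m*m.
--     n = m * m if m > 0 else 0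
--     return (n, n)
-- ===== Notes on version B (the rewrite author's own statement) =====
-- stated objective: faster
-- what changed: Replaced the O(m^2) double loop by the closed form (m*m, m*m): the Eisenstein norm is exactly invariant under two recurrence steps (f(b+e,b+2e)=f(b,e)), so every pair matches.
import Mathlib
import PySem

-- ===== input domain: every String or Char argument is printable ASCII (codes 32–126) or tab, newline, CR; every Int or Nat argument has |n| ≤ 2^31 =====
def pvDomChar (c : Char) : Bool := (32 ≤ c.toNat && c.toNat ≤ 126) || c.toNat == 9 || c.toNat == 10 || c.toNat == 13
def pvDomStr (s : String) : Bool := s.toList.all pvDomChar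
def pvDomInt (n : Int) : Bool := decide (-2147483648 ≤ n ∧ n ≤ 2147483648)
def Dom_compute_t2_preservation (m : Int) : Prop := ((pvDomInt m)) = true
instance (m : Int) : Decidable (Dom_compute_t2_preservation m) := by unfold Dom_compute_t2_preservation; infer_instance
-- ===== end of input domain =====

-- B replaces A's O(m^2) double loop by the closed form (m*m, m*m), using that the
-- Eisenstein norm is exactly invariant under two recurrence steps.


-- ===== PORT A =====
def qa_mod (x m : Int) : Int := PySem.Int.mod (x - 1) m + 1

def qa_step (b e m : Int) : Int × Int := (e, qa_mod (b + e) m)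

def eisenstein_norm (b e : Int) : Int := b * b + b * e - e * e

def compute_t2_preservation (m : Int) : List Int :=
  let st := (PySem.List.pyRange 1 (m + 1) 1).foldl (fun st b =>
      (PySem.List.pyRange 1 (m + 1) 1).foldl (fun st e =>
        let checked := st.1 + 1
        let n0 := PySem.Int.mod (eisenstein_norm b e) m
        let p2 := qa_step b e m
        let p4 := qa_step p2.1 p2.2 m
        let n2 := PySem.Int.mod (eisenstein_norm p4.1 p4.2) m
        let matched := if n0 = n2 then st.2 + 1 else st.2
        (checked, matched)) st) ((0 : Int), (0 : Int))
  [st.1, st.2]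

-- ===== PORT B =====
def compute_t2_preservation_alt (m : Int) : List Int :=
  let n := if 0 < m then m * m else 0
  [n, n]

-- ===== PRECONDITION & SPEC =====
def Spec_compute_t2_preservation (m : Int) (out : List Int) : Prop := out = compute_t2_preservation_alt m
instance (m : Int) (out : List Int) : Decidable (Spec_compute_t2_preservation m out) := by unfold Spec_compute_t2_preservation; infer_instance

-- ===== CLAIM (what is proved, stated in full; the proofs are below) =====
def Claim_equal_compute_t2_preservation : Prop := ∀ (m : Int), Dom_compute_t2_preservation m → Spec_compute_t2_preservation m (compute_t2_preservation m)

-- ===== LEMMAS AND PROOFS =====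

-- qa_mod keeps the residue class mod m (for m > 0).
lemma qa_mod_modEq (m : Int) (hm : 0 < m) (x : Int) : qa_mod x m ≡ x [ZMOD m] := by
  unfold qa_mod
  rw [PySem.Int.mod_eq_emod_of_pos hm]
  calc (x - 1) % m + 1
      ≡ (x - 1) + 1 [ZMOD m] := Int.ModEq.add_right 1 (Int.emod_emod_of_dvd _ dvd_rfl)
    _ = x := by ring

-- the Eisenstein norm residue always survives two qa_steps (for m > 0)
lemma norm_preserved (m : Int) (hm : 0 < m) (b e : Int) :
    PySem.Int.mod (eisenstein_norm b e) m =
      PySem.Int.mod (eisenstein_norm (qa_step (qa_step b e m).1 (qa_step b e m).2 m).1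
        (qa_step (qa_step b e m).1 (qa_step b e m).2 m).2) m := by
  simp only [qa_step]
  rw [PySem.Int.mod_eq_emod_of_pos hm, PySem.Int.mod_eq_emod_of_pos hm]
  have h1 : qa_mod (b + e) m ≡ b + e [ZMOD m] := qa_mod_modEq m hm _
  have h2 : qa_mod (e + qa_mod (b + e) m) m ≡ b + 2 * e [ZMOD m] := by
    calc qa_mod (e + qa_mod (b + e) m) m
        ≡ e + qa_mod (b + e) m [ZMOD m] := qa_mod_modEq m hm _
      _ ≡ e + (b + e) [ZMOD m] := Int.ModEq.add_left e h1
      _ = b + 2 * e := by ring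
  have key : eisenstein_norm (qa_mod (b + e) m) (qa_mod (e + qa_mod (b + e) m) m)
      ≡ eisenstein_norm b e [ZMOD m] := by
    unfold eisenstein_norm
    calc (qa_mod (b + e) m) * (qa_mod (b + e) m)
          + (qa_mod (b + e) m) * (qa_mod (e + qa_mod (b + e) m) m)
          - (qa_mod (e + qa_mod (b + e) m) m) * (qa_mod (e + qa_mod (b + e) m) m)
        ≡ (b + e) * (b + e) + (b + e) * (b + 2 * e) - (b + 2 * e) * (b + 2 * e) [ZMOD m] :=
          ((h1.mul h1).add (h1.mul h2)).sub (h2.mul h2)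
      _ = b * b + b * e - e * e := by ring
  exact key.symm

-- a fold whose step adds c to both components adds length * c to both
lemma foldl_add_both (c : Int) (l : List Int) (st : Int × Int) :
    l.foldl (fun (st : Int × Int) _ => (st.1 + c, st.2 + c)) st
      = (st.1 + l.length * c, st.2 + l.length * c) := by
  induction l generalizing st with
  | nil => simp
  | cons x xs ih =>
      simp only [List.foldl_cons, ih, List.length_cons]
      simp only [Prod.mk.injEq]; constructor <;> (push_cast; ring)

-- the inner loop counts every e as matched
lemma inner_loop (m : Int) (hm : 0 < m) (b : Int) (st : Int × Int) :
    (PySem.List.pyRange 1 (m + 1) 1).foldl (fun st e =>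
        let checked := st.1 + 1
        let n0 := PySem.Int.mod (eisenstein_norm b e) m
        let p2 := qa_step b e m
        let p4 := qa_step p2.1 p2.2 m
        let n2 := PySem.Int.mod (eisenstein_norm p4.1 p4.2) m
        let matched := if n0 = n2 then st.2 + 1 else st.2
        (checked, matched)) st
      = (st.1 + m, st.2 + m) := by
  have hcong : (PySem.List.pyRange 1 (m + 1) 1).foldl (fun st e =>
        let checked := st.1 + 1
        let n0 := PySem.Int.mod (eisenstein_norm b e) m
        let p2 := qa_step b e m
        let p4 := qa_step p2.1 p2.2 m
        let n2 := PySem.Int.mod (eisenstein_norm p4.1 p4.2) m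
        let matched := if n0 = n2 then st.2 + 1 else st.2
        (checked, matched)) st
      = (PySem.List.pyRange 1 (m + 1) 1).foldl
          (fun (st : Int × Int) _ => (st.1 + 1, st.2 + 1)) st := by
    apply PySem.List.foldl_congr_mem
    intro acc e _
    simp only [if_pos (norm_preserved m hm b e)]
  rw [hcong, foldl_add_both]
  have hlen : ((PySem.List.pyRange 1 (m + 1) 1).length : Int) = m := by
    rw [PySem.List.length_pyRange_one]
    omega
  rw [hlen]; simp

-- ===== VERDICT (by name: the statement is the Claim_ definition above) =====
theorem compute_t2_preservation_spec : Claim_equal_compute_t2_preservation := by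
  intro m _
  unfold Spec_compute_t2_preservation compute_t2_preservation compute_t2_preservation_alt
  by_cases hm : 0 < m
  · have hcong : (PySem.List.pyRange 1 (m + 1) 1).foldl (fun st b =>
        (PySem.List.pyRange 1 (m + 1) 1).foldl (fun st e =>
          let checked := st.1 + 1
          let n0 := PySem.Int.mod (eisenstein_norm b e) m
          let p2 := qa_step b e m
          let p4 := qa_step p2.1 p2.2 m
          let n2 := PySem.Int.mod (eisenstein_norm p4.1 p4.2) m
          let matched := if n0 = n2 then st.2 + 1 else st.2
          (checked, matched)) st) ((0 : Int), (0 : Int))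
        = (PySem.List.pyRange 1 (m + 1) 1).foldl
            (fun (st : Int × Int) _ => (st.1 + m, st.2 + m)) ((0 : Int), (0 : Int)) := by
      apply PySem.List.foldl_congr_mem
      intro acc b _
      exact inner_loop m hm b acc
    simp only [hcong, foldl_add_both]
    have hlen : ((PySem.List.pyRange 1 (m + 1) 1).length : Int) = m := by
      rw [PySem.List.length_pyRange_one]
      omega
    rw [hlen]
    simp [if_pos hm]
  · rw [PySem.List.pyRange_one_eq_nil (by omega)]
    simp [if_neg hm]
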